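-- pv_equiv track=rewrite | github.com/grawler5/reaperRM | Scripts/make_rm_fx.py | insert_before_section
-- ===== SOURCE A (Python) =====
-- def insert_before_section(text: str, insert_text: str, section='@init') -> str:
--     lines = text.splitlines()
--     out = []
--     inserted = False
--     for ln in lines:
--         if (not inserted) and ln.strip().startswith(section):
--             out.append(insert_text.rstrip('\n'))
--             inserted = True
--         out.append(ln)
--     if not inserted:
--         out.append(insert_text.rstrip('\n'))
--     return '\n'.join(out) + '\n'
-- ===== SOURCE B (Python) =====
-- def insert_before_section(text: str, insert_text: str, section='@init') -> str:
--     lines = text.splitlines()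
--     idx = next((i for i, ln in enumerate(lines) if ln.strip().startswith(section)), len(lines))
--     return '\n'.join(lines[:idx] + [insert_text.rstrip('\n')] + lines[idx:]) + '\n'
-- ===== Notes on version B (the rewrite author's own statement) =====
-- stated objective: simpler
-- what changed: Replaces the flag-guarded single-pass accumulation with computing the first matching line's index (defaulting to len(lines)) and splicing the insert line in by list slicing.
import Mathlib
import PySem

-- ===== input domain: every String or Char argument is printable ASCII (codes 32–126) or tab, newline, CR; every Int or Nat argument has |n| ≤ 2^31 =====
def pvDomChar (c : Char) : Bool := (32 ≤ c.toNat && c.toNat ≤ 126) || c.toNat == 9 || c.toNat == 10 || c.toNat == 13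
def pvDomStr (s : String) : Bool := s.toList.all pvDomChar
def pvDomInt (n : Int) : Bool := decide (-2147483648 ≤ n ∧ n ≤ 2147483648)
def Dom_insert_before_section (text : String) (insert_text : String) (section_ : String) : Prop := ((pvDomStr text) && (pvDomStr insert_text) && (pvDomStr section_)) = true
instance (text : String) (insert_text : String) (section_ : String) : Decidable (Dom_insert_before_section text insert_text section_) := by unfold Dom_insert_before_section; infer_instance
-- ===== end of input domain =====

-- B computes the first matching line's index and splices the insert line in by take/drop,
-- instead of A's flag-guarded single-pass accumulation (objective: simpler).

-- exact port of Python's str.rstrip('\n'): drop trailing newline characters (shared primitive)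
def pvRstripNL (s : String) : String :=
  String.ofList ((s.toList.reverse.dropWhile (fun c => c == '\n')).reverse)

-- the body of A's for-loop: one step of the flag-guarded accumulation
def pvStep (p : String → Bool) (ins : String) (st : List String × Bool) (ln : String) : List String × Bool :=
  if !st.2 && p ln then (st.1 ++ [ins, ln], true) else (st.1 ++ [ln], st.2)

-- ===== PORT A =====
def insert_before_section (text : String) (insert_text : String) (section_ : String) : String :=
  let lines := PySem.Str.splitlines text
  let st := lines.foldl
    (pvStep (fun ln => PySem.Str.startswith (PySem.Str.strip ln) section_)
      (pvRstripNL insert_text)) ([], false)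
  let out := if !st.2 then st.1 ++ [pvRstripNL insert_text] else st.1
  PySem.Str.join "\n" out ++ "\n"

-- ===== PORT B =====
-- first index i with p (lines[i]); defaults to lines.length (Python next(…, len(lines)))
def pvFirstIdx (p : String → Bool) : List String → Nat
  | [] => 0
  | l :: ls => if p l then 0 else pvFirstIdx p ls + 1

def insert_before_section_alt (text : String) (insert_text : String) (section_ : String) : String :=
  let lines := PySem.Str.splitlines text
  let idx := pvFirstIdx (fun ln => PySem.Str.startswith (PySem.Str.strip ln) section_) lines
  PySem.Str.join "\n" (lines.take idx ++ [pvRstripNL insert_text] ++ lines.drop idx) ++ "\n"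

-- ===== PRECONDITION & SPEC =====
def Spec_insert_before_section (text : String) (insert_text : String) (section_ : String) (out : String) : Prop := out = insert_before_section_alt text insert_text section_
instance (text : String) (insert_text : String) (section_ : String) (out : String) : Decidable (Spec_insert_before_section text insert_text section_ out) := by unfold Spec_insert_before_section; infer_instance

-- ===== CLAIM (what is proved, stated in full; the proofs are below) =====
def Claim_equal_insert_before_section : Prop := ∀ (text : String) (insert_text : String) (section_ : String), Dom_insert_before_section text insert_text section_ → Spec_insert_before_section text insert_text section_ (insert_before_section text insert_text section_)

-- ===== LEMMAS AND PROOFS =====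

-- once the flag is set, A's loop just appends the remaining lines
theorem foldl_inserted (p : String → Bool) (ins : String) (ls : List String) (acc : List String) :
    ls.foldl (pvStep p ins) (acc, true) = (acc ++ ls, true) := by
  induction ls generalizing acc with
  | nil => simp
  | cons l ls ih =>
    rw [List.foldl_cons, show pvStep p ins (acc, true) l = (acc ++ [l], true) from by
      simp [pvStep], ih]
    simp

-- A's loop + final append equals B's take/drop splice at the first matching index
theorem loop_eq_splice (p : String → Bool) (ins : String) (ls : List String) (acc : List String) :
    (if !(ls.foldl (pvStep p ins) (acc, false)).2 then
        (ls.foldl (pvStep p ins) (acc, false)).1 ++ [ins]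
      else (ls.foldl (pvStep p ins) (acc, false)).1)
    = acc ++ (ls.take (pvFirstIdx p ls) ++ [ins] ++ ls.drop (pvFirstIdx p ls)) := by
  induction ls generalizing acc with
  | nil => simp [pvFirstIdx]
  | cons l ls ih =>
    rw [List.foldl_cons]
    by_cases h : p l = true
    · rw [show pvStep p ins (acc, false) l = (acc ++ [ins, l], true) from by
        simp [pvStep, h], foldl_inserted]
      simp [pvFirstIdx, h]
    · rw [show pvStep p ins (acc, false) l = (acc ++ [l], false) from by
        simp [pvStep, h], ih (acc ++ [l])]
      simp [pvFirstIdx, h]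

-- ===== VERDICT (by name: the statement is the Claim_ definition above) =====
theorem insert_before_section_spec : Claim_equal_insert_before_section := by
  intro text insert_text section_ _
  show _ = _
  simp only [insert_before_section, insert_before_section_alt]
  rw [loop_eq_splice]
  simp
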